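-- pv_equiv track=rewrite | github.com/Goblin1024/openfoam_ai | openfoam_ai/core/validators.py | validate_boundary_compatibility
-- ===== SOURCE A (Python) =====
-- from typing import Literal, Dict, Any, List, Optional, Tuple
--
-- def validate_boundary_compatibility(bc_config: Dict[str, Any]) -> List[str]:
--     """
--     检查边界条件物理兼容性
--
--     Returns:
--         错误信息列表
--     """
--     errors = []
--
--     # 检查压力-速度耦合
--     has_pressure_inlet = any(
--         bc.get('type') in ['totalPressure', 'fixedValue']
--         for name, bc in bc_config.items()
--         if 'p' in name.lower() or 'pressure' in name.lower()
--     )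
--
--     has_velocity_inlet = any(
--         bc.get('type') == 'fixedValue'
--         for name, bc in bc_config.items()
--         if 'u' in name.lower() or 'velocity' in name.lower() or 'inlet' in name.lower()
--     )
--
--     if has_pressure_inlet and has_velocity_inlet:
--         errors.append("警告：同时指定压力入口和速度入口可能导致过约束")
--
--     # 检查边界是否闭合
--     # 简化检查：至少应该有入口和出口
--     has_inlet = any('inlet' in name.lower() for name in bc_config.keys())
--     has_outlet = any('outlet' in name.lower() for name in bc_config.keys())
--
--     if not has_inlet:
--         errors.append("警告：未检测到入口边界")
--     if not has_outlet:
--         errors.append("警告：未检测到出口边界")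
--
--     return errors
-- ===== SOURCE B (Python) =====
-- def validate_boundary_compatibility(bc_config):
--     """Single pass over bc_config maintaining four flags, instead of four any() scans."""
--     has_pressure_inlet = has_velocity_inlet = has_inlet = has_outlet = False
--     for name, bc in bc_config.items():
--         nm = name.lower()
--         t = bc.get('type')
--         if ('p' in nm or 'pressure' in nm) and (t == 'totalPressure' or t == 'fixedValue'):
--             has_pressure_inlet = True
--         if ('u' in nm or 'velocity' in nm or 'inlet' in nm) and t == 'fixedValue':
--             has_velocity_inlet = True
--         if 'inlet' in nm:
--             has_inlet = True
--         if 'outlet' in nm: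
--             has_outlet = True
--     errors = []
--     if has_pressure_inlet and has_velocity_inlet:
--         errors.append("警告：同时指定压力入口和速度入口可能导致过约束")
--     if not has_inlet:
--         errors.append("警告：未检测到入口边界")
--     if not has_outlet:
--         errors.append("警告：未检测到出口边界")
--     return errors
-- ===== Notes on version B (the rewrite author's own statement) =====
-- stated objective: alternative
-- what changed: Replaces A's four independent any() scans over bc_config (each lowercasing names again) with one loop that lowercases each name once, looks up 'type' once, and updates four boolean flags.
import Mathlib
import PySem

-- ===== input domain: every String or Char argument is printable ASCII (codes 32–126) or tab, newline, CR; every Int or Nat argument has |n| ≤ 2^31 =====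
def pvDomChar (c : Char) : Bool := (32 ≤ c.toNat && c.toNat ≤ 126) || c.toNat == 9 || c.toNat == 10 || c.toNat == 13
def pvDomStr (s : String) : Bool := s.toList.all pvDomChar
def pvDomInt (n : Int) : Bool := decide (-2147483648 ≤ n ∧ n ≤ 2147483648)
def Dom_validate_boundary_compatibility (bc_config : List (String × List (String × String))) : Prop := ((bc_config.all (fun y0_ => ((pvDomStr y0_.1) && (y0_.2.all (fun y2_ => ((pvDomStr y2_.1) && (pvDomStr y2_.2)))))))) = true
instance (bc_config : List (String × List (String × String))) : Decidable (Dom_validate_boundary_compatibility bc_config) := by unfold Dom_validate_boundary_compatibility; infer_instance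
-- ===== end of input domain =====

-- B replaces A's four separate any() scans over the dict with one loop carrying four boolean flags (objective: alternative decomposition).

-- ===== PORT A =====
-- bc.get('type') in ['totalPressure', 'fixedValue']  (None in a list of strings is False)
def pvTypePressure (bc : List (String × String)) : Bool :=
  ((PySem.Dict.mk bc).get? "type").elim false (fun t => ["totalPressure", "fixedValue"].contains t)

-- bc.get('type') == 'fixedValue'
def pvTypeFixed (bc : List (String × String)) : Bool :=
  ((PySem.Dict.mk bc).get? "type") == some "fixedValue"

def validate_boundary_compatibility (bc_config : List (String × List (String × String))) : List String :=
  let errors : List String := []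
  let has_pressure_inlet :=
    (bc_config.filter (fun p =>
      PySem.Str.isIn "p" (PySem.Str.lower p.1) || PySem.Str.isIn "pressure" (PySem.Str.lower p.1))).any
      (fun p => pvTypePressure p.2)
  let has_velocity_inlet :=
    (bc_config.filter (fun p =>
      PySem.Str.isIn "u" (PySem.Str.lower p.1) || PySem.Str.isIn "velocity" (PySem.Str.lower p.1) ||
        PySem.Str.isIn "inlet" (PySem.Str.lower p.1))).any
      (fun p => pvTypeFixed p.2)
  let errors := if has_pressure_inlet && has_velocity_inlet then
      errors ++ ["警告：同时指定压力入口和速度入口可能导致过约束"] else errors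
  let has_inlet := bc_config.any (fun p => PySem.Str.isIn "inlet" (PySem.Str.lower p.1))
  let has_outlet := bc_config.any (fun p => PySem.Str.isIn "outlet" (PySem.Str.lower p.1))
  let errors := if !has_inlet then errors ++ ["警告：未检测到入口边界"] else errors
  let errors := if !has_outlet then errors ++ ["警告：未检测到出口边界"] else errors
  errors

-- ===== PORT B =====
-- one loop step updating the four flags (has_pressure, has_velocity, has_inlet, has_outlet)
def pvStep (st : Bool × Bool × Bool × Bool) (p : String × List (String × String)) :
    Bool × Bool × Bool × Bool :=
  let nm := PySem.Str.lower p.1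
  let t := (PySem.Dict.mk p.2).get? "type"
  ( st.1 || ((PySem.Str.isIn "p" nm || PySem.Str.isIn "pressure" nm) &&
             (t == some "totalPressure" || t == some "fixedValue")),
    st.2.1 || ((PySem.Str.isIn "u" nm || PySem.Str.isIn "velocity" nm || PySem.Str.isIn "inlet" nm) &&
               (t == some "fixedValue")),
    st.2.2.1 || PySem.Str.isIn "inlet" nm,
    st.2.2.2 || PySem.Str.isIn "outlet" nm )

def validate_boundary_compatibility_alt (bc_config : List (String × List (String × String))) : List String :=
  let st := bc_config.foldl pvStep (false, false, false, false)
  let errors : List String := []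
  let errors := if st.1 && st.2.1 then
      errors ++ ["警告：同时指定压力入口和速度入口可能导致过约束"] else errors
  let errors := if !st.2.2.1 then errors ++ ["警告：未检测到入口边界"] else errors
  let errors := if !st.2.2.2 then errors ++ ["警告：未检测到出口边界"] else errors
  errors

-- ===== PRECONDITION & SPEC =====
def Spec_validate_boundary_compatibility (bc_config : List (String × List (String × String))) (out : List String) : Prop := out = validate_boundary_compatibility_alt bc_config
instance (bc_config : List (String × List (String × String))) (out : List String) : Decidable (Spec_validate_boundary_compatibility bc_config out) := by unfold Spec_validate_boundary_compatibility; infer_instance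

-- ===== CLAIM (what is proved, stated in full; the proofs are below) =====
def Claim_equal_validate_boundary_compatibility : Prop := ∀ (bc_config : List (String × List (String × String))), Dom_validate_boundary_compatibility bc_config → Spec_validate_boundary_compatibility bc_config (validate_boundary_compatibility bc_config)

-- ===== LEMMAS AND PROOFS =====

-- per-item predicates (proof abbreviations for the components of pvStep)
def pvF1 (p : String × List (String × String)) : Bool :=
  (PySem.Str.isIn "p" (PySem.Str.lower p.1) || PySem.Str.isIn "pressure" (PySem.Str.lower p.1)) &&
    ((PySem.Dict.mk p.2).get? "type" == some "totalPressure" ||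
     (PySem.Dict.mk p.2).get? "type" == some "fixedValue")

def pvF2 (p : String × List (String × String)) : Bool :=
  (PySem.Str.isIn "u" (PySem.Str.lower p.1) || PySem.Str.isIn "velocity" (PySem.Str.lower p.1) ||
     PySem.Str.isIn "inlet" (PySem.Str.lower p.1)) &&
    ((PySem.Dict.mk p.2).get? "type" == some "fixedValue")

def pvF3 (p : String × List (String × String)) : Bool := PySem.Str.isIn "inlet" (PySem.Str.lower p.1)
def pvF4 (p : String × List (String × String)) : Bool := PySem.Str.isIn "outlet" (PySem.Str.lower p.1)

theorem pvStep_eq (st : Bool × Bool × Bool × Bool) (p : String × List (String × String)) :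
    pvStep st p = (st.1 || pvF1 p, st.2.1 || pvF2 p, st.2.2.1 || pvF3 p, st.2.2.2 || pvF4 p) := rfl

theorem pvFoldl_eq (l : List (String × List (String × String))) (st : Bool × Bool × Bool × Bool) :
    l.foldl pvStep st =
      (st.1 || l.any pvF1, st.2.1 || l.any pvF2, st.2.2.1 || l.any pvF3, st.2.2.2 || l.any pvF4) := by
  induction l generalizing st with
  | nil => simp
  | cons hd tl ih =>
    rw [List.foldl_cons, pvStep_eq, ih]
    simp only [List.any_cons, Bool.or_assoc]

theorem pvTypePressure_eq (bc : List (String × String)) :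
    pvTypePressure bc = (((PySem.Dict.mk bc).get? "type") == some "totalPressure" ||
                         ((PySem.Dict.mk bc).get? "type") == some "fixedValue") := by
  unfold pvTypePressure
  cases (PySem.Dict.mk bc).get? "type" with
  | none => rfl
  | some v => simp only [Option.elim, List.contains_cons, List.contains_nil, Bool.or_false,
      Option.some_beq_some]

theorem pvHasPressure_eq (l : List (String × List (String × String))) :
    (l.filter (fun p =>
        PySem.Str.isIn "p" (PySem.Str.lower p.1) || PySem.Str.isIn "pressure" (PySem.Str.lower p.1))).any
      (fun p => pvTypePressure p.2) = l.any pvF1 := by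
  rw [List.any_filter]
  congr 1
  funext x
  rw [pvTypePressure_eq]
  rfl

theorem pvHasVelocity_eq (l : List (String × List (String × String))) :
    (l.filter (fun p =>
        PySem.Str.isIn "u" (PySem.Str.lower p.1) || PySem.Str.isIn "velocity" (PySem.Str.lower p.1) ||
          PySem.Str.isIn "inlet" (PySem.Str.lower p.1))).any
      (fun p => pvTypeFixed p.2) = l.any pvF2 := by
  rw [List.any_filter]
  rfl

-- ===== VERDICT (by name: the statement is the Claim_ definition above) =====
theorem validate_boundary_compatibility_spec : Claim_equal_validate_boundary_compatibility := by
  intro bc _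
  unfold Spec_validate_boundary_compatibility validate_boundary_compatibility validate_boundary_compatibility_alt
  rw [pvFoldl_eq, pvHasPressure_eq, pvHasVelocity_eq]
  rfl
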